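-- pv_equiv track=rewrite | github.com/theonly1me/advent-of-code-2024 | day4/day4_1.py | search_word_in_a_direction
-- ===== SOURCE A (Python) =====
-- def search_word_in_a_direction(grid, row, col, step_row, step_col, word="XMAS") -> bool:
--     rows, cols = len(grid), len(grid[0])
--     for i in range(len(word)):
--         current_row, current_col = row + i * step_row, col + i * step_col
--         if current_row < 0 \
--             or current_col < 0 \
--             or current_row >= rows or \
--             current_col >= cols or \
--             grid[current_row][current_col] != word[i]:
--             return False
--     return True
-- ===== SOURCE B (Python) =====
-- def search_word_in_a_direction(grid, row, col, step_row, step_col, word="XMAS") -> bool: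
--     rows, cols = len(grid), len(grid[0])
--
--     def extract(r, c, n):
--         # recursively harvest the next n cells along the direction,
--         # or None if the path leaves the grid
--         if n == 0:
--             return []
--         if not (0 <= r < rows and 0 <= c < cols):
--             return None
--         rest = extract(r + step_row, c + step_col, n - 1)
--         return None if rest is None else [grid[r][c]] + rest
--
--     path = extract(row, col, len(word))
--     return path is not None and path == list(word)
-- ===== Notes on version B (the rewrite author's own statement) =====
-- stated objective: alternative
-- what changed: B recursively harvests the cells along the direction into a list (None as soon as the path leaves the grid) and then compares the whole harvested list against list(word) in one equality, instead of A's indexed loop that recomputes each coordinate and checks bounds and one character per step with early return.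
-- outside the precondition, e.g. on search_word_in_a_direction([['A', 'B'], ['C']], 0, 1, 1, 0, 'QX'): A returns False, B raises IndexError
import Mathlib
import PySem

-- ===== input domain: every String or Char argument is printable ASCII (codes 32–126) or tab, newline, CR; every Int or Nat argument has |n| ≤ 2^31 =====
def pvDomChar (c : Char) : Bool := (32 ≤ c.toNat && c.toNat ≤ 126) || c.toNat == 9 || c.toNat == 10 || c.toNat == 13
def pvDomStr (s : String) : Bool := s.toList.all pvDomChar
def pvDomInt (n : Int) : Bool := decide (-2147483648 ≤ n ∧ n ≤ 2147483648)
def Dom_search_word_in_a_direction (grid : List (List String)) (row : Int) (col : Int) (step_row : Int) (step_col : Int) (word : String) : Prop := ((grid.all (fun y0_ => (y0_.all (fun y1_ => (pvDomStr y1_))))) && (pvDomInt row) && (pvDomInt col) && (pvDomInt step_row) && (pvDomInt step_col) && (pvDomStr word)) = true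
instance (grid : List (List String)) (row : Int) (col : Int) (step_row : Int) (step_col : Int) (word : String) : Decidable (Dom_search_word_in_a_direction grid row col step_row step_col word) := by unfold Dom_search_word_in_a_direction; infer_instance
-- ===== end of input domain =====

-- B recursively harvests the path's cells into a list (None if the path leaves the grid)
-- and compares the whole list to list(word) at once, instead of A's indexed check-per-step
-- loop: an alternative decomposition of the same O(n) task.

-- ===== PORT A =====
-- the cell grid[r][c] both Pythons read (guards ensure 0 ≤ r < rows, 0 ≤ c before any read)
def pvCell (grid : List (List String)) (r c : Int) : List Char :=
  ((PySem.List.pyGet? ((PySem.List.pyGet? grid r).getD []) c).getD "").toList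

def searchA_go (grid : List (List String)) (rows cols row col step_row step_col : Int) :
    List Char → Nat → Bool
  | [], _ => true
  | ch :: rest, i =>
    let current_row := row + (i : Int) * step_row
    let current_col := col + (i : Int) * step_col
    if current_row < 0 ∨ current_col < 0 ∨ rows ≤ current_row ∨ cols ≤ current_col ∨
        pvCell grid current_row current_col ≠ [ch] then false
    else searchA_go grid rows cols row col step_row step_col rest (i + 1)

def search_word_in_a_direction (grid : List (List String)) (row : Int) (col : Int) (step_row : Int) (step_col : Int) (word : String) : Bool :=
  let rows : Int := grid.length
  let cols : Int := ((PySem.List.pyGet? grid 0).getD []).length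
  searchA_go grid rows cols row col step_row step_col word.toList 0

-- ===== PORT B =====
-- Source B's recursive 'extract': harvest n cells starting at (r, c), none if out of bounds
def extractB (grid : List (List String)) (rows cols step_row step_col : Int) :
    Nat → Int → Int → Option (List (List Char))
  | 0, _, _ => some []
  | n + 1, r, c =>
    if 0 ≤ r ∧ r < rows ∧ 0 ≤ c ∧ c < cols then
      match extractB grid rows cols step_row step_col n (r + step_row) (c + step_col) with
      | none => none
      | some rest => some (pvCell grid r c :: rest)
    else none

def search_word_in_a_direction_alt (grid : List (List String)) (row : Int) (col : Int) (step_row : Int) (step_col : Int) (word : String) : Bool :=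
  let rows : Int := grid.length
  let cols : Int := ((PySem.List.pyGet? grid 0).getD []).length
  match extractB grid rows cols step_row step_col word.toList.length row col with
  | none => false
  | some path => decide (path = word.toList.map (fun ch => [ch]))

-- ===== PRECONDITION & SPEC =====
-- Pre_ excludes the empty grid (both Pythons raise IndexError on len(grid[0])) and ragged
-- grids on which some scanned position is in bounds by the first row's width but beyond its
-- own shorter row: there grid[r][c] raises IndexError in B (and in A unless an earlier
-- character already mismatched, in which case A returns False; Pre_ is slightly narrow there).
def Pre_search_word_in_a_direction (grid : List (List String)) (row : Int) (col : Int) (step_row : Int) (step_col : Int) (word : String) : Prop :=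
  grid ≠ [] ∧
  ∀ i : Nat, i < word.toList.length →
    (0 ≤ row + (i : Int) * step_row ∧ row + (i : Int) * step_row < (grid.length : Int) ∧
     0 ≤ col + (i : Int) * step_col ∧ col + (i : Int) * step_col < ((grid.headD []).length : Int)) →
    col + (i : Int) * step_col < (((grid.getD (row + (i : Int) * step_row).toNat []).length : Int))
instance (grid : List (List String)) (row : Int) (col : Int) (step_row : Int) (step_col : Int) (word : String) : Decidable (Pre_search_word_in_a_direction grid row col step_row step_col word) := by unfold Pre_search_word_in_a_direction; infer_instance

def pvWitness_search_word_in_a_direction : List (List String) × Int × Int × Int × Int × String :=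
  ([["X", "M"], ["A", "S"]], 0, 0, 1, 1, "XS")

def Spec_search_word_in_a_direction (grid : List (List String)) (row : Int) (col : Int) (step_row : Int) (step_col : Int) (word : String) (out : Bool) : Prop := out = search_word_in_a_direction_alt grid row col step_row step_col word
instance (grid : List (List String)) (row : Int) (col : Int) (step_row : Int) (step_col : Int) (word : String) (out : Bool) : Decidable (Spec_search_word_in_a_direction grid row col step_row step_col word out) := by unfold Spec_search_word_in_a_direction; infer_instance

-- ===== CLAIM (what is proved, stated in full; the proofs are below) =====
def Claim_equal_search_word_in_a_direction : Prop := ∀ (grid : List (List String)) (row : Int) (col : Int) (step_row : Int) (step_col : Int) (word : String), Dom_search_word_in_a_direction grid row col step_row step_col word → Pre_search_word_in_a_direction grid row col step_row step_col word → Spec_search_word_in_a_direction grid row col step_row step_col word (search_word_in_a_direction grid row col step_row step_col word)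

-- ===== LEMMAS AND PROOFS =====

-- A's loop at index i equals B's harvest-then-compare started at the i-th position
theorem searchA_eq_extract (grid : List (List String)) (rows cols row col sr sc : Int) :
    ∀ (cs : List Char) (i : Nat),
      searchA_go grid rows cols row col sr sc cs i =
      (match extractB grid rows cols sr sc cs.length
          (row + (i : Int) * sr) (col + (i : Int) * sc) with
       | none => false
       | some path => decide (path = cs.map (fun ch => [ch]))) := by
  intro cs
  induction cs with
  | nil => intro i; simp [searchA_go, extractB]
  | cons ch rest ih =>
    intro i
    rw [searchA_go]
    show _ = (match extractB grid rows cols sr sc (rest.length + 1)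
        (row + (i : Int) * sr) (col + (i : Int) * sc) with
      | none => false
      | some path => decide (path = (ch :: rest).map (fun c => [c])))
    rw [extractB]
    by_cases hb : 0 ≤ row + (i : Int) * sr ∧ row + (i : Int) * sr < rows ∧
        0 ≤ col + (i : Int) * sc ∧ col + (i : Int) * sc < cols
    · rw [if_pos hb]
      have hstep_r : row + (i : Int) * sr + sr = row + ((i + 1 : Nat) : Int) * sr := by
        push_cast; ring
      have hstep_c : col + (i : Int) * sc + sc = col + ((i + 1 : Nat) : Int) * sc := by
        push_cast; ring
      by_cases hc : pvCell grid (row + (i : Int) * sr) (col + (i : Int) * sc) = [ch]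
      · rw [if_neg (by push Not; exact ⟨by omega, by omega, by omega, by omega, hc⟩)]
        rw [ih (i + 1)]
        rw [hstep_r, hstep_c]
        cases extractB grid rows cols sr sc rest.length
            (row + ((i + 1 : Nat) : Int) * sr) (col + ((i + 1 : Nat) : Int) * sc) with
        | none => rfl
        | some path => simp [hc]
      · rw [if_pos (Or.inr (Or.inr (Or.inr (Or.inr hc))))]
        cases hE : extractB grid rows cols sr sc rest.length
            (row + (i : Int) * sr + sr) (col + (i : Int) * sc + sc) with
        | none => rfl
        | some path => simp [hc]
    · rw [if_neg hb]
      rw [if_pos (by omega)]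

-- ===== VERDICT (by name: the statement is the Claim_ definition above) =====
theorem search_word_in_a_direction_spec : Claim_equal_search_word_in_a_direction := by
  intro grid row col step_row step_col word _hDom _hPre
  unfold Spec_search_word_in_a_direction
  unfold search_word_in_a_direction search_word_in_a_direction_alt
  have h := searchA_eq_extract grid (grid.length : Int)
    (((PySem.List.pyGet? grid 0).getD []).length : Int) row col step_row step_col
    word.toList 0
  simpa using h
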